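-- pv_equiv track=rewrite | github.com/Hunterdii/GeeksforGeeks-POTD | October 2025 GFG SOLUTION/October-20.py | countBSTs
-- ===== SOURCE A (Python) =====
-- def countBSTs(arr):
--     n = len(arr)
--     p = sorted((arr[i], i) for i in range(n))
--     c = [0] * (n + 1)
--     c[0] = c[1] = 1
--     for i in range(2, n + 1):
--         for j in range(i):
--             c[i] += c[j] * c[i - j - 1]
--     res = [0] * n
--     for i in range(n):
--         res[p[i][1]] = c[i] * c[n - i - 1]
--     return res
-- ===== SOURCE B (Python) =====
-- def countBSTs(arr):
--     n = len(arr)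
--     # Catalan numbers via the linear multiplicative recurrence
--     # C(k+1) = C(k) * 2*(2k+1) // (k+2)   (exact integer division)
--     c = [1]
--     for k in range(n):
--         c.append(c[k] * (2 * (2 * k + 1)) // (k + 2))
--     # rank of element k = number of j with (arr[j], j) < (arr[k], k) lexicographically
--     res = []
--     for k in range(n):
--         r = 0
--         for j in range(n):
--             if arr[j] < arr[k] or (arr[j] == arr[k] and j < k):
--                 r += 1
--         res.append(c[r] * c[n - 1 - r])
--     return res
-- ===== Notes on version B (the rewrite author's own statement) =====
-- stated objective: faster
-- what changed: The O(n^2) big-integer convolution DP for Catalan numbers is replaced by the exact linear multiplicative recurrence C(k+1)=C(k)*2(2k+1)//(k+2), and the sort-then-scatter assembly is replaced by directly counting, for each element, how many pairs (arr[j], j) precede (arr[k], k) lexicographically.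
import Mathlib
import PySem

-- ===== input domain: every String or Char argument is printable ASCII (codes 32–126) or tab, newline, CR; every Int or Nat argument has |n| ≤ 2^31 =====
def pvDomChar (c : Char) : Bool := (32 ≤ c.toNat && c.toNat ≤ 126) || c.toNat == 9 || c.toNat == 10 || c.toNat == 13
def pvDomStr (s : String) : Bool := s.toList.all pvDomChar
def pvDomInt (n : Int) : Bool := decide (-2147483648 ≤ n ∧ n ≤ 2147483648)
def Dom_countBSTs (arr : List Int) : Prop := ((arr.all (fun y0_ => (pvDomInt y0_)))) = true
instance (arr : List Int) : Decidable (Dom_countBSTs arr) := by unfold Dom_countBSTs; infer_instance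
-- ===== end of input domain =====

-- B replaces A's O(n^2) big-integer convolution DP for the Catalan table by the exact linear
-- multiplicative recurrence C(k+1) = C(k)*2*(2k+1) // (k+2), and replaces A's sort-then-scatter
-- result assembly by directly counting, for each element, the pairs (arr[j], j) that precede
-- (arr[k], k) lexicographically.

-- ===== PORT A =====
def countBSTs (arr : List Int) : List Int :=
  let n : Int := PySem.List.len arr
  let p : List (Int × Int) :=
    PySem.List.sorted2 ((PySem.List.pyRange 0 n 1).map (fun i => (PySem.List.pyGetD arr i 0, i)))
      (fun x => x.1) (fun x => x.2) false
  let c0 : List Int := ((List.replicate (n + 1).toNat 0).set 0 1).set 1 1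
  let c : List Int := (PySem.List.pyRange 2 (n + 1) 1).foldl (fun c i =>
      (PySem.List.pyRange 0 i 1).foldl (fun c j =>
        c.set i.toNat (PySem.List.pyGetD c i 0 + PySem.List.pyGetD c j 0 * PySem.List.pyGetD c (i - j - 1) 0)) c) c0
  (PySem.List.pyRange 0 n 1).foldl (fun res i =>
      res.set (PySem.List.pyGetD p i (0, 0)).2.toNat
        (PySem.List.pyGetD c i 0 * PySem.List.pyGetD c (n - i - 1) 0))
    (List.replicate n.toNat 0)

-- ===== PORT B =====
def countBSTs_alt (arr : List Int) : List Int :=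
  let n : Int := PySem.List.len arr
  let c : List Int := (PySem.List.pyRange 0 n 1).foldl (fun c k =>
      c ++ [PySem.Int.floordiv (PySem.List.pyGetD c k 0 * (2 * (2 * k + 1))) (k + 2)]) [1]
  (PySem.List.pyRange 0 n 1).foldl (fun res k =>
      let r : Int := (PySem.List.pyRange 0 n 1).foldl (fun r j =>
        if PySem.List.pyGetD arr j 0 < PySem.List.pyGetD arr k 0 ∨
           (PySem.List.pyGetD arr j 0 = PySem.List.pyGetD arr k 0 ∧ j < k) then r + 1 else r) 0
      res ++ [PySem.List.pyGetD c r 0 * PySem.List.pyGetD c (n - 1 - r) 0]) []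

-- ===== PRECONDITION & SPEC =====
-- Pre_ excludes only the empty list: there A raises IndexError (it assigns index 1 of the
-- one-element Catalan table), returning no value.
def Pre_countBSTs (arr : List Int) : Prop := arr ≠ []
instance (arr : List Int) : Decidable (Pre_countBSTs arr) := by unfold Pre_countBSTs; infer_instance
def pvWitness_countBSTs : List Int := [3, 1, 2]

def Spec_countBSTs (arr : List Int) (out : List Int) : Prop := out = countBSTs_alt arr
instance (arr : List Int) (out : List Int) : Decidable (Spec_countBSTs arr out) := by unfold Spec_countBSTs; infer_instance

-- ===== CLAIM =====
def Claim_equal_countBSTs : Prop := ∀ (arr : List Int), Dom_countBSTs arr → Pre_countBSTs arr → Spec_countBSTs arr (countBSTs arr)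

-- ===== LEMMAS AND PROOFS =====
def blex (a b : Int × Int) : Bool := decide (a.1 < b.1) || (!decide (b.1 < a.1) && decide (a.2 < b.2))

theorem blex_iff (a b : Int × Int) : blex a b = true ↔ a.1 < b.1 ∨ (a.1 = b.1 ∧ a.2 < b.2) := by
  simp [blex]; omega

theorem blex_false_iff (a b : Int × Int) : blex a b = false ↔ b.1 < a.1 ∨ (a.1 = b.1 ∧ ¬ a.2 < b.2) := by
  simp [blex]; omega

theorem blex_irrefl (a : Int × Int) : blex a a = false := by
  rw [blex_false_iff]; omega

theorem blex_conn (a b : Int × Int) (h1 : blex a b = false) (h2 : blex b a = false) : a = b := by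
  rw [blex_false_iff] at h1 h2
  have : a.1 = b.1 ∧ a.2 = b.2 := by omega
  exact Prod.ext this.1 this.2

theorem blex_trans (a b c : Int × Int) (h1 : blex a b = true) (h2 : blex b c = true) : blex a c = true := by
  rw [blex_iff] at *; omega

theorem blex_asymm (a b : Int × Int) (h : blex a b = true) : blex b a = false := by
  rw [blex_iff] at h; rw [blex_false_iff]; omega

theorem pairwise_insertBy (x : Int × Int) (l : List (Int × Int))
    (h : l.Pairwise (fun a b => blex b a = false)) :
    (PySem.List.insertBy blex x l).Pairwise (fun a b => blex b a = false) := by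
  induction l with
  | nil => simp [PySem.List.insertBy]
  | cons y ys ih =>
    simp only [PySem.List.insertBy]
    rcases List.pairwise_cons.mp h with ⟨hy, hys⟩
    by_cases hxy : blex x y = true
    · simp only [hxy, if_true]
      refine List.pairwise_cons.mpr ⟨?_, h⟩
      intro z hz
      rcases List.mem_cons.mp hz with rfl | hz
      · exact blex_asymm _ _ hxy
      · -- blex z x = false: if blex z x then blex z y (trans with hxy) contradicting hy z
        by_contra hc
        have hzx : blex z x = true := by revert hc; cases blex z x <;> simp
        have := blex_trans _ _ _ hzx hxy
        rw [hy z hz] at this; exact absurd this (by simp)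
    · simp only [hxy]
      refine List.pairwise_cons.mpr ⟨?_, ih hys⟩
      intro z hz
      rw [PySem.List.mem_insertBy] at hz
      rcases hz with rfl | hz
      · simpa using hxy
      · exact hy z hz

theorem pairwise_sortfold (xs acc : List (Int × Int))
    (hacc : acc.Pairwise (fun a b => blex b a = false)) :
    (xs.foldl (fun acc x => PySem.List.insertBy blex x acc) acc).Pairwise (fun a b => blex b a = false) := by
  induction xs generalizing acc with
  | nil => simpa
  | cons x t ih => exact ih _ (pairwise_insertBy x acc hacc)

theorem pairwise_strict_of_nodup (p : List (Int × Int)) (hnd : p.Nodup)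
    (hp : p.Pairwise (fun a b => blex b a = false)) :
    p.Pairwise (fun a b => blex a b = true) := by
  have := List.Pairwise.and hnd hp
  exact this.imp (by
    rintro a b ⟨hne, hf⟩
    cases hab : blex a b
    · exact absurd (blex_conn a b hab hf) hne
    · rfl)

-- countP position lemma
theorem countP_pos (p : List (Int × Int)) (hp : p.Pairwise (fun a b => blex a b = true))
    (i : Nat) (hi : i < p.length) :
    p.countP (fun x => blex x p[i]) = i := by
  have hpg := List.pairwise_iff_getElem.mp hp
  obtain ⟨e, he⟩ : ∃ e, p[i] = e := ⟨p[i], rfl⟩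
  rw [he]
  have hcount : p.countP (fun x => blex x e) =
      (p.take i).countP (fun x => blex x e) + (p.drop i).countP (fun x => blex x e) := by
    rw [← List.countP_append, List.take_append_drop]
  rw [hcount]
  have h1 : (p.take i).countP (fun x => blex x e) = i := by
    have : ∀ x ∈ p.take i, blex x e = true := by
      intro x hx
      rw [List.mem_take_iff_getElem] at hx
      obtain ⟨j, hj, hjx⟩ := hx
      have hj' : j < i := by omega
      subst hjx
      rw [← he]
      exact hpg j i (by omega) hi hj'
    rw [List.countP_eq_length.mpr this, List.length_take]
    omega
  have h2 : (p.drop i).countP (fun x => blex x e) = 0 := by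
    rw [List.countP_eq_zero]
    intro x hx
    rw [Bool.not_eq_true]
    rw [List.mem_drop_iff_getElem] at hx
    obtain ⟨j, hj, hjx⟩ := hx
    subst hjx
    rcases Nat.eq_zero_or_pos j with rfl | hjpos
    · simp only [Nat.add_zero] at *
      rw [← he] at *
      exact blex_irrefl _
    · apply blex_asymm
      rw [← he]
      exact hpg i (i + j) hi (by omega) (by omega)
  omega

theorem scatter_length (ws : List (Nat × Int)) (res : List Int) :
    (ws.foldl (fun r w => r.set w.1 w.2) res).length = res.length := by
  induction ws generalizing res with
  | nil => rfl
  | cons w t ih => simpa [List.foldl_cons] using ih (res.set w.1 w.2)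

theorem find?_of_unique {α} (pred : α → Bool) (l : List α) (w : α) (hw : w ∈ l) (hp : pred w)
    (hu : ∀ x ∈ l, pred x → x = w) : l.find? pred = some w := by
  induction l with
  | nil => simp at hw
  | cons a t ih =>
    by_cases ha : pred a
    · have h := hu a (by simp) ha
      subst h
      simp [List.find?_cons, ha]
    · simp only [List.mem_cons] at hw
      rcases hw with rfl | h
      · simp [hp] at ha
      · simp only [List.find?_cons, Bool.not_eq_true] at *
        rw [ha]
        exact ih h fun x hx => hu x (by simp [hx])

theorem scatter_getD (ws : List (Nat × Int)) (res : List Int) (k : Nat) (hk : k < res.length) :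
    (ws.foldl (fun r w => r.set w.1 w.2) res).getD k 0 =
      (match ws.reverse.find? (fun w => w.1 == k) with
        | some w => w.2
        | none => res.getD k 0) := by
  induction ws generalizing res with
  | nil => simp
  | cons w t ih =>
    simp only [List.foldl_cons, List.reverse_cons, List.find?_append]
    rw [ih (res.set w.1 w.2) (by simpa using hk)]
    cases hf : t.reverse.find? (fun w => w.1 == k) with
    | some w' => simp
    | none =>
      simp only [Option.none_or]
      by_cases hwk : w.1 = k
      · subst hwk
        simp [List.getD_eq_getElem, List.getElem_set, hk]
      · have : (w.1 == k) = false := by simpa using hwk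
        simp only [List.find?_cons, this, List.find?_nil]
        rw [List.getD_eq_getElem _ _ (by simpa using hk), List.getD_eq_getElem _ _ hk]
        simp [List.getElem_set, hwk]

theorem cat_mul (k : Nat) : (k + 2) * catalan (k + 1) = 2 * (2 * k + 1) * catalan k := by
  have h1 := succ_mul_catalan_eq_centralBinom (k + 1)
  have h2 := Nat.succ_mul_centralBinom_succ k
  have h3 := succ_mul_catalan_eq_centralBinom k
  have key : (k + 1) * ((k + 2) * catalan (k + 1)) = (k + 1) * (2 * (2 * k + 1) * catalan k) := by
    calc (k + 1) * ((k + 2) * catalan (k + 1)) = (k + 1) * (k + 1 + 1) * catalan (k + 1) := by ring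
    _ = (k + 1) * ((k + 1 + 1) * catalan (k + 1)) := by ring
    _ = (k + 1) * (k + 1).centralBinom := by rw [h1]
    _ = 2 * (2 * k + 1) * k.centralBinom := h2
    _ = 2 * (2 * k + 1) * ((k + 1) * catalan k) := by rw [h3]
    _ = (k + 1) * (2 * (2 * k + 1) * catalan k) := by ring
  exact Nat.eq_of_mul_eq_mul_left (by omega) key

theorem cat_step (k : Nat) :
    PySem.Int.floordiv ((catalan k : Int) * (2 * (2 * (k : Int) + 1))) ((k : Int) + 2) =
      (catalan (k + 1) : Int) := by
  have h : (catalan k : Int) * (2 * (2 * (k : Int) + 1)) = ((catalan k * (2 * (2 * k + 1)) : Nat) : Int) := by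
    push_cast; ring
  have h2 : ((k : Int) + 2) = ((k + 2 : Nat) : Int) := by push_cast; ring
  rw [h, h2, PySem.Int.floordiv_natCast]
  congr 1
  have : catalan k * (2 * (2 * k + 1)) = (k + 2) * catalan (k + 1) := by
    rw [cat_mul]; ring
  rw [this, Nat.mul_div_cancel_left _ (by omega)]

theorem cat_sum (m : Nat) (hm : 1 ≤ m) :
    ((List.range m).map (fun j => (catalan j : Int) * (catalan (m - 1 - j) : Int))).sum
      = (catalan m : Int) := by
  obtain ⟨t, rfl⟩ : ∃ t, m = t + 1 := ⟨m - 1, by omega⟩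
  rw [catalan_succ t]
  push_cast
  rw [Fin.sum_univ_eq_sum_range (fun j => (catalan j : Int) * (catalan (t - j) : Int)) (t+1)]
  rfl

def catsTo (m : Nat) : List Int := (List.range m).map (fun i => (catalan i : Int))
def cpart (n m : Nat) : List Int := (List.range (n+1)).map (fun i => if i < m then (catalan i : Int) else 0)

theorem getD_catsTo (m k : Nat) (hk : k < m) :
    PySem.List.pyGetD (catsTo m) (k : Int) 0 = (catalan k : Int) := by
  rw [PySem.List.pyGetD_natCast]
  simp [catsTo, List.getD_eq_getElem?_getD, List.getElem?_map, List.getElem?_range, hk]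

theorem b_table (n : Nat) :
    (PySem.List.pyRange 0 (n : Int) 1).foldl (fun c k =>
        c ++ [PySem.Int.floordiv (PySem.List.pyGetD c k 0 * (2 * (2 * k + 1))) (k + 2)]) [1]
      = catsTo (n + 1) := by
  induction n with
  | zero => simp [PySem.List.pyRange_zero, catsTo, catalan_zero]
  | succ m ih =>
    have hcast : ((m + 1 : Nat) : Int) = (m : Int) + 1 := by push_cast; ring
    rw [hcast, PySem.List.pyRange_one_succ_right (by positivity), List.foldl_append, ih]
    simp only [List.foldl_cons, List.foldl_nil]
    rw [getD_catsTo (m+1) m (by omega), cat_step]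
    simp [catsTo, List.range_succ]

theorem length_cpart (n m : Nat) : (cpart n m).length = n + 1 := by simp [cpart]

theorem getElem_cpart (n m k : Nat) (hk : k < n + 1) :
    (cpart n m)[k]'(by simp [cpart]; omega) = if k < m then (catalan k : Int) else 0 := by
  simp [cpart]

theorem cpart_succ (n m : Nat) (hm : m ≤ n) :
    (cpart n m).set m (catalan m : Int) = cpart n (m + 1) := by
  apply List.ext_getElem (by simp [cpart])
  intro k hk hk2
  have hkn : k < n + 1 := by simpa [length_cpart] using hk2
  rw [List.getElem_set, getElem_cpart n (m+1) k hkn]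
  by_cases hmk : m = k
  · subst hmk; rw [if_pos rfl, if_pos (by omega)]
  · rw [if_neg hmk, getElem_cpart n m k hkn]
    split_ifs <;> first | rfl | omega

theorem cpart_top (n : Nat) : cpart n (n + 1) = catsTo (n + 1) := by
  apply List.ext_getElem (by simp [cpart, catsTo])
  intro k hk hk2
  rw [length_cpart] at hk
  rw [getElem_cpart n (n+1) k hk, if_pos hk]
  simp [catsTo]

theorem c0_eq (n : Nat) (h : 1 ≤ n) :
    ((List.replicate (n + 1) (0 : Int)).set 0 1).set 1 1 = cpart n 2 := by
  apply List.ext_getElem (by simp [cpart])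
  intro k hk hk2
  rw [length_cpart] at hk2
  simp only [List.getElem_set, List.getElem_replicate]
  rw [getElem_cpart n 2 k hk2]
  rcases k with _ | _ | k
  · norm_num [catalan_zero]
  · norm_num [catalan_one]
  · norm_num

-- reads from (cpart n m).set m S
theorem getD_set_cpart (n m : Nat) (S : Int) (k : Nat) (hk : k ≤ n) (hne : k ≠ m) :
    PySem.List.pyGetD ((cpart n m).set m S) (k : Int) 0 = if k < m then (catalan k : Int) else 0 := by
  rw [PySem.List.pyGetD_natCast]
  rw [List.getD_eq_getElem _ _ (by simp [cpart]; omega)]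
  rw [List.getElem_set, if_neg (by omega)]
  exact getElem_cpart n m k (by omega)

theorem getD_set_cpart_self (n m : Nat) (S : Int) (hm : m ≤ n) :
    PySem.List.pyGetD ((cpart n m).set m S) (m : Int) 0 = S := by
  rw [PySem.List.pyGetD_natCast]
  rw [List.getD_eq_getElem _ _ (by simp [cpart]; omega)]
  rw [List.getElem_set, if_pos rfl]

theorem a_inner (n m : Nat) (h2 : 2 ≤ m) (hm : m ≤ n) (t : Nat) (ht : t ≤ m) :
    (PySem.List.pyRange 0 (t : Int) 1).foldl (fun c j =>
        c.set ((m : Int)).toNat (PySem.List.pyGetD c (m : Int) 0 +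
          PySem.List.pyGetD c j 0 * PySem.List.pyGetD c ((m : Int) - j - 1) 0)) (cpart n m)
      = (cpart n m).set m ((List.range t).map (fun j => (catalan j : Int) * (catalan (m - 1 - j) : Int))).sum := by
  induction t with
  | zero =>
    rw [Nat.cast_zero, PySem.List.pyRange_one_eq_nil (le_refl (0:Int))]
    simp only [List.foldl_nil, List.range_zero, List.map_nil, List.sum_nil]
    -- set m 0 = cpart (position m holds 0 already)
    apply List.ext_getElem (by simp)
    intro k hk hk2
    rw [List.getElem_set]
    have hkn : k < n + 1 := by simpa [length_cpart] using hk2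
    split_ifs with hkm
    · subst hkm; rw [getElem_cpart n m m hkn, if_neg (by omega)]
    · rfl
  | succ t iht =>
    have hcast : ((t + 1 : Nat) : Int) = (t : Int) + 1 := by push_cast; ring
    rw [hcast, PySem.List.pyRange_one_succ_right (by positivity), List.foldl_append, iht (by omega)]
    simp only [List.foldl_cons, List.foldl_nil]
    rw [getD_set_cpart_self n m _ (by omega)]
    rw [getD_set_cpart n m _ t (by omega) (by omega), if_pos (by omega)]
    have hidx : (m : Int) - (t : Int) - 1 = ((m - t - 1 : Nat) : Int) := by push_cast [Nat.cast_sub] <;> omega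
    rw [hidx, getD_set_cpart n m _ (m - t - 1) (by omega) (by omega), if_pos (by omega)]
    rw [Int.toNat_natCast, List.set_set]
    congr 1
    rw [List.range_succ, List.map_append, List.sum_append]
    have : m - 1 - t = m - t - 1 := by omega
    simp [this]

theorem a_outer (n : Nat) (hn : 1 ≤ n) (u : Nat) (h2 : 2 ≤ u) (hu : u ≤ n + 1) :
    (PySem.List.pyRange 2 (u : Int) 1).foldl
      (fun c i => (PySem.List.pyRange 0 i 1).foldl
        (fun c j => c.set i.toNat (PySem.List.pyGetD c i 0 +
          PySem.List.pyGetD c j 0 * PySem.List.pyGetD c (i - j - 1) 0)) c)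
      (cpart n 2) = cpart n u := by
  induction u with
  | zero => omega
  | succ v ih =>
    by_cases hv : v < 2
    · have : v = 1 := by omega
      subst this
      rw [show ((2 : Nat) : Int) = 2 by norm_num] at *
      rw [PySem.List.pyRange_one_eq_nil (by norm_num)]
      rfl
    · have h2v : 2 ≤ v := by omega
      have hcast : ((v + 1 : Nat) : Int) = (v : Int) + 1 := by push_cast; ring
      rw [hcast, PySem.List.pyRange_one_succ_right (by exact_mod_cast h2v), List.foldl_append,
        ih h2v (by omega)]
      simp only [List.foldl_cons, List.foldl_nil]
      rw [a_inner n v h2v (by omega) v (le_refl v), cat_sum v (by omega), cpart_succ n v (by omega)]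

def pairsOf (arr : List Int) : List (Int × Int) :=
  (List.range arr.length).map (fun j => (arr.getD j 0, (j : Int)))

def rnk (arr : List Int) (k : Nat) : Nat :=
  (pairsOf arr).countP (fun x => blex x (arr.getD k 0, (k : Int)))

theorem countP_congr' {α : Type} (l : List α) (p q : α → Bool) (h : ∀ a ∈ l, p a = q a) :
    l.countP p = l.countP q := by
  induction l with
  | nil => rfl
  | cons a t ih =>
    rw [List.countP_cons, List.countP_cons, h a (by simp), ih fun x hx => h x (by simp [hx])]

theorem mem_pairsOf (arr : List Int) (x : Int × Int) :
    x ∈ pairsOf arr ↔ ∃ j, j < arr.length ∧ x = (arr.getD j 0, (j : Int)) := by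
  simp only [pairsOf, List.mem_map, List.mem_range]
  constructor
  · rintro ⟨j, hj, rfl⟩; exact ⟨j, hj, rfl⟩
  · rintro ⟨j, hj, rfl⟩; exact ⟨j, hj, rfl⟩

theorem length_pairsOf (arr : List Int) : (pairsOf arr).length = arr.length := by
  simp [pairsOf]

theorem nodup_pairsOf (arr : List Int) : (pairsOf arr).Nodup := by
  refine List.Nodup.map_on ?_ (List.nodup_range)
  intro a ha b hb hab
  have : (a : Int) = (b : Int) := congrArg Prod.snd hab
  exact_mod_cast this

theorem sorted2_eq_fold (xs : List (Int × Int)) :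
    PySem.List.sorted2 xs (fun x => x.1) (fun x => x.2) false =
      xs.foldl (fun acc x => PySem.List.insertBy blex x acc) [] := rfl

-- the sorted list: permutation, strict pairwise
theorem p_perm (arr : List Int) :
    (PySem.List.sorted2 (pairsOf arr) (fun x => x.1) (fun x => x.2) false).Perm (pairsOf arr) :=
  PySem.List.sorted2_perm _ _ _ _

theorem p_strict (arr : List Int) :
    (PySem.List.sorted2 (pairsOf arr) (fun x => x.1) (fun x => x.2) false).Pairwise
      (fun a b => blex a b = true) := by
  apply pairwise_strict_of_nodup
  · exact (List.Perm.nodup_iff (p_perm arr)).mpr (nodup_pairsOf arr)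
  · rw [sorted2_eq_fold]
    exact pairwise_sortfold _ _ List.Pairwise.nil

theorem p_length (arr : List Int) :
    (PySem.List.sorted2 (pairsOf arr) (fun x => x.1) (fun x => x.2) false).length = arr.length := by
  rw [(p_perm arr).length_eq, length_pairsOf]

-- central index lemma: rnk arr k is the position of (arr.getD k 0, k) in the sorted list
theorem p_index (arr : List Int) (k : Nat) (hk : k < arr.length) :
    ∃ h : rnk arr k < (PySem.List.sorted2 (pairsOf arr) (fun x => x.1) (fun x => x.2) false).length,
      (PySem.List.sorted2 (pairsOf arr) (fun x => x.1) (fun x => x.2) false)[rnk arr k] =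
        (arr.getD k 0, (k : Int)) := by
  set p := PySem.List.sorted2 (pairsOf arr) (fun x => x.1) (fun x => x.2) false with hp
  have he : (arr.getD k 0, (k : Int)) ∈ p := by
    rw [List.Perm.mem_iff (p_perm arr), mem_pairsOf]
    exact ⟨k, hk, rfl⟩
  obtain ⟨i, hi, hie⟩ := List.mem_iff_getElem.mp he
  have hcnt := countP_pos p (p_strict arr) i hi
  rw [hie] at hcnt
  have : rnk arr k = i := by
    rw [rnk, ← List.Perm.countP_eq _ (p_perm arr)]
    exact hcnt
  rw [this]
  exact ⟨hi, hie⟩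

theorem A_eq (arr : List Int) (h1 : 1 ≤ arr.length) :
    countBSTs arr = (List.range arr.length).map (fun k =>
      (catalan (rnk arr k) : Int) * (catalan (arr.length - rnk arr k - 1) : Int)) := by
  have hgen : (PySem.List.pyRange 0 (arr.length : Int) 1).map
      (fun i => (PySem.List.pyGetD arr i 0, i)) = pairsOf arr := by
    rw [PySem.List.pyRange_zero_nat, List.map_map]
    simp [pairsOf, Function.comp, PySem.List.pyGetD_natCast]
  have hc1 : ((arr.length : Int) + 1).toNat = arr.length + 1 := by omega
  have hc2 : ((arr.length : Int) + 1) = ((arr.length + 1 : Nat) : Int) := by push_cast; ring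
  simp only [countBSTs, PySem.List.len_eq, hgen, hc1, Int.toNat_natCast]
  rw [c0_eq arr.length h1, hc2, a_outer arr.length h1 (arr.length + 1) (by omega) (le_refl _),
    cpart_top arr.length]
  set n := arr.length with hn
  set p := PySem.List.sorted2 (pairsOf arr) (fun x => x.1) (fun x => x.2) false with hpdef
  have hplen : p.length = n := p_length arr
  have hpnd : p.Nodup := (List.Perm.nodup_iff (p_perm arr)).mpr (nodup_pairsOf arr)
  rw [PySem.List.pyRange_zero_nat, List.foldl_map]
  have hstep := PySem.List.foldl_congr_mem (List.range n)
    (fun (res : List Int) (k : Nat) => res.set (PySem.List.pyGetD p (k : Int) (0, 0)).2.toNat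
      (PySem.List.pyGetD (catsTo (n+1)) (k : Int) 0 *
       PySem.List.pyGetD (catsTo (n+1)) ((n : Int) - (k : Int) - 1) 0))
    (fun (res : List Int) (k : Nat) => res.set ((p.getD k (0, 0)).2.toNat)
      ((catalan k : Int) * (catalan (n - k - 1) : Int)))
    (List.replicate n 0)
    (by
      intro acc k hk
      rw [List.mem_range] at hk
      dsimp only
      have hcast : (n : Int) - (k : Int) - 1 = ((n - k - 1 : Nat) : Int) := by omega
      rw [hcast, getD_catsTo (n+1) k (by omega), getD_catsTo (n+1) (n - k - 1) (by omega),
        PySem.List.pyGetD_natCast])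
  rw [hstep]
  rw [← List.foldl_map (f := fun (k : Nat) => ((p.getD k (0, 0)).2.toNat,
        (catalan k : Int) * (catalan (n - k - 1) : Int)))
      (g := fun (r : List Int) (w : Nat × Int) => r.set w.1 w.2)]
  apply List.ext_getElem
  · rw [scatter_length]; simp
  intro k hk1 hk2
  rw [List.length_map, List.length_range] at hk2
  obtain ⟨hrlt, hre⟩ := p_index arr k (by omega)
  rw [hplen] at hrlt
  have hq : (p.getD (rnk arr k) (0, 0)).2.toNat = k := by
    rw [List.getD_eq_getElem _ _ (by omega), hre]
    simp
  rw [← List.getD_eq_getElem _ 0 hk1, scatter_getD _ _ k (by simpa using hk2)]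
  rw [find?_of_unique _ _ ((k, (catalan (rnk arr k) : Int) * (catalan (n - rnk arr k - 1) : Int)))
    (by
      rw [List.mem_reverse, List.mem_map]
      exact ⟨rnk arr k, by rw [List.mem_range]; omega, by rw [hq]⟩)
    (by simp)
    (by
      rintro x hx hpx
      rw [List.mem_reverse, List.mem_map] at hx
      obtain ⟨i, hi, rfl⟩ := hx
      rw [List.mem_range] at hi
      simp only [beq_iff_eq] at hpx
      -- hpx : (p.getD i (0,0)).2.toNat = k
      have hilt : i < p.length := by omega
      rw [List.getD_eq_getElem _ _ hilt] at hpx ⊢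
      have hpim : p[i] ∈ pairsOf arr := (List.Perm.mem_iff (p_perm arr)).mp (List.getElem_mem hilt)
      rw [mem_pairsOf] at hpim
      obtain ⟨j, hj, hpij⟩ := hpim
      have hjk : j = k := by
        rw [hpij] at hpx
        simpa using hpx
      rw [hjk] at hpij
      have : p[i] = p[rnk arr k]'(by omega) := by rw [hre, hpij]
      have hieq : i = rnk arr k := (List.Nodup.getElem_inj_iff hpnd).mp this
      subst hieq
      rw [hre]
      simp)]
  rw [List.getElem_map, List.getElem_range]

theorem B_eq (arr : List Int) (h1 : 1 ≤ arr.length) :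
    countBSTs_alt arr = (List.range arr.length).map (fun k =>
      (catalan (rnk arr k) : Int) * (catalan (arr.length - rnk arr k - 1) : Int)) := by
  simp only [countBSTs_alt, PySem.List.len_eq]
  rw [b_table arr.length, PySem.List.foldl_append_singleton_eq_map, List.nil_append]
  set n := arr.length with hn
  rw [PySem.List.pyRange_zero_nat, List.map_map]
  apply List.map_congr_left
  intro k hk
  rw [List.mem_range] at hk
  dsimp only [Function.comp]
  -- the inner counting loop is a countP
  rw [PySem.List.foldl_ite_add_one
    (p := fun j => PySem.List.pyGetD arr j 0 < PySem.List.pyGetD arr (k : Int) 0 ∨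
      (PySem.List.pyGetD arr j 0 = PySem.List.pyGetD arr (k : Int) 0 ∧ j < (k : Int)))]
  rw [List.countP_map]
  have hcnt : (List.range n).countP
      ((fun j => decide (PySem.List.pyGetD arr j 0 < PySem.List.pyGetD arr (k : Int) 0 ∨
        (PySem.List.pyGetD arr j 0 = PySem.List.pyGetD arr (k : Int) 0 ∧ j < (k : Int)))) ∘
        (fun j : Nat => (j : Int))) = rnk arr k := by
    rw [rnk, pairsOf, List.countP_map]
    apply countP_congr'
    intro j hj
    rw [List.mem_range] at hj
    dsimp only [Function.comp]
    rw [Bool.eq_iff_iff]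
    simp only [PySem.List.pyGetD_natCast, decide_eq_true_eq, blex_iff]
  rw [hcnt]
  simp only [Int.zero_add]
  obtain ⟨hrlt, -⟩ := p_index arr k (by omega)
  rw [p_length arr] at hrlt
  have hcast : (n : Int) - 1 - ((rnk arr k : Nat) : Int) = ((n - rnk arr k - 1 : Nat) : Int) := by omega
  rw [hcast, getD_catsTo (n+1) (rnk arr k) (by omega), getD_catsTo (n+1) (n - rnk arr k - 1) (by omega)]

-- ===== VERDICT =====
theorem countBSTs_spec : Claim_equal_countBSTs := by
  intro arr _ hpre
  unfold Spec_countBSTs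
  have h1 : 1 ≤ arr.length := List.length_pos_iff.mpr hpre
  rw [A_eq arr h1, B_eq arr h1]
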